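-- pv_equiv track=rewrite | github.com/kauserishika/Gen-AI-Tasks | ai-resume-screening/chains/pipeline.py | get_edu_score
-- ===== SOURCE A (Python) =====
-- def get_edu_score(extracted: dict) -> int:
--     field = (extracted.get("education", {}).get("field", "") + " " +
--              extracted.get("education", {}).get("degree", "")).lower()
--     if any(k in field for k in ["computer science","machine learning","statistics",
--                                  "mathematics","data science","engineering","physics"]):
--         return 5
--     if any(k in field for k in ["business","economics","information","biology"]):
--         return 2
--     return 0
-- ===== SOURCE B (Python) =====
-- _EDU_SCORES = {
--     "computer science": 5, "machine learning": 5, "statistics": 5,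
--     "mathematics": 5, "data science": 5, "engineering": 5, "physics": 5,
--     "business": 2, "economics": 2, "information": 2, "biology": 2,
-- }
--
-- def get_edu_score(extracted: dict) -> int:
--     edu = extracted.get("education", {})
--     field = (edu.get("field", "") + " " + edu.get("degree", "")).lower()
--     return max((s for k, s in _EDU_SCORES.items() if k in field), default=0)
-- ===== Notes on version B (the rewrite author's own statement) =====
-- stated objective: alternative
-- what changed: Replaces the two ordered any()-with-early-return keyword guards by one keyword-to-score table scanned once, collecting the score of every keyword found in the field string and returning the maximum (default 0).
import Mathlib
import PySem

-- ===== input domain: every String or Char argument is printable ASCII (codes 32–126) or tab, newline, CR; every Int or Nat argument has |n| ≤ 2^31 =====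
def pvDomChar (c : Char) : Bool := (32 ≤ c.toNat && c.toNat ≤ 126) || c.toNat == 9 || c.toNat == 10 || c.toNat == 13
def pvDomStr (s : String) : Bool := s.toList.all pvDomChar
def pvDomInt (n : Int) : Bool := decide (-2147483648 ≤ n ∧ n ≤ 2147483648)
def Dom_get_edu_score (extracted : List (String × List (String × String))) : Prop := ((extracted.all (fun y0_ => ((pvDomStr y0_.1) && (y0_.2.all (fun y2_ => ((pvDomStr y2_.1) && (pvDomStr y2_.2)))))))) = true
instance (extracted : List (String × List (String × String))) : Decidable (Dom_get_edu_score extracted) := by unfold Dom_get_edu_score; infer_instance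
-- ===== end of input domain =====

-- ===== PORT A =====
-- Python dict.get(k, dflt) on an association list: first match, else default (exact:
-- the dict type has unique keys, so first match is the value).
def eduGetD {ν : Type} (d : List (String × ν)) (k : String) (dflt : ν) : ν :=
  match d with
  | [] => dflt
  | (k', v) :: t => if k' == k then v else eduGetD t k dflt

def get_edu_score (extracted : List (String × List (String × String))) : Int :=
  -- field = (extracted.get("education", {}).get("field","") + " " + extracted.get("education", {}).get("degree","")).lower()
  let field := PySem.Chars.lower
      ((eduGetD (eduGetD extracted "education" []) "field" "").toList ++
       " ".toList ++
       (eduGetD (eduGetD extracted "education" []) "degree" "").toList)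
  if ["computer science".toList, "machine learning".toList, "statistics".toList,
      "mathematics".toList, "data science".toList, "engineering".toList,
      "physics".toList].any (fun k => PySem.Chars.isIn k field) then 5
  else if ["business".toList, "economics".toList, "information".toList,
           "biology".toList].any (fun k => PySem.Chars.isIn k field) then 2
  else 0

-- ===== PORT B =====
-- keyword -> score table (insertion order of Source B's _EDU_SCORES dict)
def eduScoreTable : List (List Char × Int) :=
  [("computer science".toList, 5), ("machine learning".toList, 5), ("statistics".toList, 5),
   ("mathematics".toList, 5), ("data science".toList, 5), ("engineering".toList, 5),
   ("physics".toList, 5),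
   ("business".toList, 2), ("economics".toList, 2), ("information".toList, 2),
   ("biology".toList, 2)]

def get_edu_score_alt (extracted : List (String × List (String × String))) : Int :=
  let edu := eduGetD extracted "education" []
  let field := PySem.Chars.lower
      ((eduGetD edu "field" "").toList ++ " ".toList ++ (eduGetD edu "degree" "").toList)
  -- max(scores of matching keywords, default=0)
  match PySem.List.max? (eduScoreTable.filterMap
          (fun p => if PySem.Chars.isIn p.1 field then some p.2 else none))
        (fun s => s) with
  | some m => m
  | none => 0

-- ===== PRECONDITION & SPEC =====
def Spec_get_edu_score (extracted : List (String × List (String × String))) (out : Int) : Prop := out = get_edu_score_alt extracted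
instance (extracted : List (String × List (String × String))) (out : Int) : Decidable (Spec_get_edu_score extracted out) := by unfold Spec_get_edu_score; infer_instance

-- ===== CLAIM (what is proved, stated in full; the proofs are below) =====
def Claim_equal_get_edu_score : Prop := ∀ (extracted : List (String × List (String × String))), Dom_get_edu_score extracted → Spec_get_edu_score extracted (get_edu_score extracted)

-- ===== LEMMAS AND PROOFS =====

-- ===== VERDICT (by name: the statement is the Claim_ definition above) =====
-- With the 11 substring tests abstracted to booleans, the agreement of the two
-- ports is a finite Bool/Int computation, checked by `decide`; the main theorem
-- instantiates it (both ports build the same lowercased field term, so the two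
-- sides are definitionally those of the core lemma).
theorem edu_core (b1 b2 b3 b4 b5 b6 b7 b8 b9 b10 b11 : Bool) :
    (if [b1, b2, b3, b4, b5, b6, b7].any (fun b => b) then (5 : Int)
     else if [b8, b9, b10, b11].any (fun b => b) then 2
     else 0)
    = match PySem.List.max?
          (List.filterMap (fun p : Int × Bool => if p.2 then some p.1 else none)
            [(5, b1), (5, b2), (5, b3), (5, b4), (5, b5), (5, b6), (5, b7),
             (2, b8), (2, b9), (2, b10), (2, b11)])
          (fun s => s) with
      | some m => m
      | none => 0 := by
  revert b1 b2 b3 b4 b5 b6 b7 b8 b9 b10 b11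
  decide

theorem get_edu_score_spec : Claim_equal_get_edu_score := by
  intro extracted _
  unfold Spec_get_edu_score get_edu_score get_edu_score_alt eduScoreTable
  exact edu_core _ _ _ _ _ _ _ _ _ _ _
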